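-- pv_equiv track=rewrite | github.com/StudyForCoding/ProgrammersLevel | Level2/Lessons17679/yang.py | pull
-- ===== SOURCE A (Python) =====
-- import copy
--
-- def pull(board):
--     board_copy = copy.deepcopy(board)
--     cnt = 0
--     for y in range(len(board)):
--         for x in reversed(range(len(board[0]))):
--             if board[y][x] == '9':
--                 cnt += 1
--                 del board[y][x]
--         for _ in range(cnt):
--             board[y].append('9')
--
--         cnt = 0
--     return board
-- ===== SOURCE B (Python) =====
-- def pull(board):
--     for row in board:
--         row.sort(key=lambda c: c == '9')
--     return board
-- ===== Notes on version B (the rewrite author's own statement) =====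
-- stated objective: simpler
-- what changed: A's per-row count-delete-append index scan (reversed index loop with del and appends) is replaced by a stable in-place sort of each row keyed on (cell == '9'), which pushes the '9's to the end in one idiomatic statement.
-- intended difference: On boards where some row is longer than board[0] and that row's tail beyond index len(board[0]) has a '9' before a non-'9', A returns the row with only its first len(board[0]) cells scanned (interior '9's in the tail stay put), while B moves ALL of the row's '9's to the end — the intended behaviour, since A's len(board[0]) bound on every row is an indexing slip. — e.g. on pull([["a"], ["a", "9", "b"]]): A returns [["a"], ["a", "9", "b"]], B returns [["a"], ["a", "b", "9"]]
import Mathlib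
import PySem

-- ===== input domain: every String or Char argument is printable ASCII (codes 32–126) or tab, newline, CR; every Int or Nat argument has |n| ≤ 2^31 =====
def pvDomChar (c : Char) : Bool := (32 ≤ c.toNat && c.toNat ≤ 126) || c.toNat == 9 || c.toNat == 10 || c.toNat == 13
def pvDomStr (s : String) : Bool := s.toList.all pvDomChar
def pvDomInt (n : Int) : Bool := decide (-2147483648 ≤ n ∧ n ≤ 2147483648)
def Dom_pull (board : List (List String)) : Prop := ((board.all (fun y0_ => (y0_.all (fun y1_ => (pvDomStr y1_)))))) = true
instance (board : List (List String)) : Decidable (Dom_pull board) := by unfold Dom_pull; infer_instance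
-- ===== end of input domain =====

-- B replaces A's count-delete-append index scan by a stable in-place sort of each row
-- keyed on (cell == '9') — simpler. Both A and B mutate the rows of the argument in place
-- and return the same board object; the equivalence proved here is about the return value.

-- ===== PORT A =====
-- inner loop 'for x in reversed(range(m)): if board[y][x] == '9': cnt += 1; del board[y][x]'
def pullScan (row : List String) (cnt : Nat) : Nat → List String × Nat
  | 0 => (row, cnt)
  | n + 1 =>
      if PySem.List.pyGet? row (n : Int) = some "9" then
        pullScan (row.eraseIdx n) (cnt + 1) n
      else
        pullScan row cnt n

def pull (board : List (List String)) : List (List String) :=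
  let m := (board.headD []).length          -- len(board[0]) (0 when board is empty: the loop body never runs)
  board.map (fun row =>
    let p := pullScan row 0 m               -- the scan, then cnt appends of '9'
    p.1 ++ List.replicate p.2 "9")

-- ===== PORT B =====
def pull_alt (board : List (List String)) : List (List String) :=
  board.map (fun row => PySem.List.sorted row (fun c => c == "9"))

-- ===== PRECONDITION & SPEC =====
-- Pre_ is exactly A's return domain: A scans every row by indices len(board[0])-1 … 0 and
-- raises IndexError when some row is shorter than board[0].
def Pre_pull (board : List (List String)) : Prop :=
  ∀ row ∈ board, (board.headD []).length ≤ row.length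
instance (board : List (List String)) : Decidable (Pre_pull board) := by unfold Pre_pull; infer_instance

def pvWitness_pull : List (List String) := [["9", "a", "9"], ["b", "9", "c"]]

-- On boards where some row is longer than board[0] and that row's tail beyond index
-- len(board[0]) has a '9' before a non-'9' cell, A returns the row with only its first
-- len(board[0]) cells scanned (the tail's interior '9' stays put), while B returns the row
-- with ALL its '9's moved to the end — the intended behaviour, since A's len(board[0])
-- bound on every row is an indexing slip.
def D_pull (board : List (List String)) : Prop :=
  ∃ row ∈ board,
    (((row.drop (board.headD []).length).dropWhile (fun c => !(c == "9"))).any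
      (fun c => !(c == "9"))) = true
instance (board : List (List String)) : Decidable (D_pull board) := by unfold D_pull; infer_instance

def Spec_pull (board : List (List String)) (out : List (List String)) : Prop := ¬ D_pull board → out = pull_alt board
instance (board : List (List String)) (out : List (List String)) : Decidable (Spec_pull board out) := by unfold Spec_pull; infer_instance

def pvDiffWitness_pull : List (List String) := [["a"], ["a", "9", "b"]]
def pvDiffWitnessOut_pull : (List (List String)) × (List (List String)) :=
  ([["a"], ["a", "9", "b"]], [["a"], ["a", "b", "9"]])

-- ===== CLAIM (what is proved, stated in full; the proofs are below) =====
def Claim_unchanged_pull : Prop := ∀ (board : List (List String)), Dom_pull board → Pre_pull board → Spec_pull board (pull board)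
def Claim_changed_pull : Prop := Dom_pull (pvDiffWitness_pull) ∧ Pre_pull (pvDiffWitness_pull) ∧ D_pull (pvDiffWitness_pull) ∧ pull (pvDiffWitness_pull) = pvDiffWitnessOut_pull.1 ∧ pull_alt (pvDiffWitness_pull) = pvDiffWitnessOut_pull.2 ∧ pvDiffWitnessOut_pull.1 ≠ pvDiffWitnessOut_pull.2
def Claim_exact_pull : Prop := ∀ (board : List (List String)), Dom_pull board → Pre_pull board → D_pull board → pull board ≠ pull_alt board

-- ===== LEMMAS AND PROOFS =====

-- A's scan over indices n-1 … 0: the scanned prefix keeps its non-'9' cells and the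
-- deletions are counted.
theorem pullScan_eq (n : Nat) : ∀ (row : List String) (cnt : Nat), n ≤ row.length →
    pullScan row cnt n =
      ((row.take n).filter (fun c => !(c == "9")) ++ row.drop n,
       cnt + (row.take n).countP (fun c => c == "9")) := by
  induction n with
  | zero => intro row cnt _; simp [pullScan]
  | succ n ih =>
    intro row cnt hn
    have hlt : n < row.length := by omega
    have hget : PySem.List.pyGet? row (n : Int) = some row[n] := by
      rw [PySem.List.pyGet?_natCast, List.getElem?_eq_getElem hlt]
    have htake : row.take (n + 1) = row.take n ++ [row[n]] := by
      rw [List.take_add_one, List.getElem?_eq_getElem hlt]; rfl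
    by_cases h9 : row[n] = "9"
    · have hcond : PySem.List.pyGet? row (n : Int) = some "9" := by rw [hget, h9]
      have he : row.eraseIdx n = row.take n ++ row.drop (n + 1) :=
        List.eraseIdx_eq_take_drop_succ row n
      have hlen : n ≤ (row.eraseIdx n).length := by
        have := List.length_eraseIdx_of_lt hlt
        omega
      have htk : (row.eraseIdx n).take n = row.take n := by
        rw [he, List.take_append_of_le_length (by simp [List.length_take]; omega)]
        simp [List.take_take]
      have hdp : (row.eraseIdx n).drop n = row.drop (n + 1) := by
        rw [he]
        have hl : (row.take n).length = n := by simp [List.length_take]; omega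
        rw [List.drop_append_of_le_length (by omega)]
        simp
      rw [h9] at htake
      simp only [pullScan]
      rw [if_pos hcond, ih _ _ hlen, htk, hdp, htake]
      simp [List.filter_append, List.countP_append]
      omega
    · have hb : (row[n] == "9") = false := by simp [h9]
      have hcond : ¬ PySem.List.pyGet? row (n : Int) = some "9" := by
        rw [hget]; simp [h9]
      have hdrop : row.drop n = row[n] :: row.drop (n + 1) :=
        List.drop_eq_getElem_cons hlt
      simp only [pullScan]
      rw [if_neg hcond, ih _ _ (by omega), htake, hdrop, List.filter_append,
        List.countP_append]
      simp [hb]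

-- insertBy of a non-'9' cell into (non-'9' cells ++ trailing '9's) lands at the boundary
theorem insertBy_not9 (x : String) (hx : (x == "9") = false) (n : Nat) :
    ∀ (F : List String), (∀ f ∈ F, (f == "9") = false) →
    PySem.List.insertBy (fun a b => decide ((a == "9") < (b == "9"))) x
        (F ++ List.replicate n "9") = (F ++ [x]) ++ List.replicate n "9" := by
  intro F
  induction F with
  | nil =>
    intro _
    cases n with
    | zero => simp [PySem.List.insertBy]
    | succ m =>
      have hb : decide ((x == "9") < (("9" : String) == "9")) = true := by
        rw [hx]; decide
      simp only [List.nil_append, List.replicate_succ, PySem.List.insertBy, hb, if_true]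
      simp
  | cons f F ihF =>
    intro hF
    have hf : (f == "9") = false := hF f (by simp)
    have hb : decide ((x == "9") < ((f == "9"))) = false := by
      rw [hx, hf]; decide
    simp only [List.cons_append, PySem.List.insertBy, hb, Bool.false_eq_true, if_false]
    rw [ihF (fun g hg => hF g (by simp [hg]))]

-- insertBy of a '9' goes to the very end
theorem insertBy_9 (n : Nat) (F : List String) (hF : ∀ f ∈ F, (f == "9") = false) :
    PySem.List.insertBy (fun a b => decide ((a == "9") < (b == "9"))) "9"
        (F ++ List.replicate n "9") = F ++ List.replicate (n + 1) "9" := by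
  rw [PySem.List.insertBy_of_forall_not_before]
  · rw [List.append_assoc, ← List.replicate_succ' (n := n)]
  · intro y hy
    have : (("9" : String) == "9") = true := by decide
    rw [this]
    rcases List.mem_append.mp hy with h | h
    · rw [hF y h]; decide
    · have : y = "9" := List.eq_of_mem_replicate h
      subst this; decide

-- the stable sort keyed on (c == "9") is: non-'9' cells in order, then the '9's
theorem sorted_key9 (row : List String) :
    PySem.List.sorted row (fun c => c == "9") =
      row.filter (fun c => !(c == "9")) ++
        List.replicate (row.countP (fun c => c == "9")) "9" := by
  rw [PySem.List.sorted_eq_foldl_insertBy]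
  suffices h : ∀ (r F : List String) (n : Nat), (∀ f ∈ F, (f == "9") = false) →
      r.foldl (fun acc x =>
          PySem.List.insertBy (fun a b => decide ((a == "9") < (b == "9"))) x acc)
        (F ++ List.replicate n "9") =
      (F ++ r.filter (fun c => !(c == "9"))) ++
        List.replicate (n + r.countP (fun c => c == "9")) "9" by
    have := h row [] 0 (by simp)
    simpa using this
  intro r
  induction r with
  | nil => intro F n hF; simp
  | cons x xs ih =>
    intro F n hF
    by_cases hx : (x == "9") = true
    · have hx' : x = "9" := eq_of_beq hx
      simp only [List.foldl_cons]
      rw [hx', insertBy_9 n F hF, ih F (n + 1) hF]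
      have : (("9" : String) == "9") = true := by decide
      simp
      ring_nf
    · have hx' : (x == "9") = false := by simpa using hx
      simp only [List.foldl_cons]
      rw [insertBy_not9 x hx' n F hF,
          ih (F ++ [x]) n (by
            intro f hf
            rcases List.mem_append.mp hf with h | h
            · exact hF f h
            · simp at h; subst h; exact hx')]
      simp [hx']

-- a list whose '9's come only after all its non-'9's is "its non-'9's, then its '9's"
theorem no_interior_nine (t : List String)
    (h : ((t.dropWhile (fun c => !(c == "9"))).any (fun c => !(c == "9"))) = false) :
    t = t.filter (fun c => !(c == "9")) ++
        List.replicate (t.countP (fun c => c == "9")) "9" := by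
  induction t with
  | nil => simp
  | cons x t iht =>
    by_cases hx : (x == "9") = true
    · have hx' : x = "9" := eq_of_beq hx
      subst hx'
      rw [List.dropWhile_cons] at h
      simp only [beq_self_eq_true, Bool.not_true, Bool.false_eq_true, if_false,
        List.any_cons, Bool.or_eq_false_iff, List.any_eq_false] at h
      have hall : ∀ c ∈ t, c = "9" := by
        intro c hc
        have hc9 : (c == "9") = true := by
          have := h.2 c hc
          simpa using this
        exact eq_of_beq hc9
      have hrep : t = List.replicate t.length "9" := List.eq_replicate_of_mem hall
      have hcnt : t.countP (fun c => c == "9") = t.length :=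
        List.countP_eq_length.mpr (fun c hc => by rw [hall c hc]; decide)
      have hfil : t.filter (fun c => !(c == "9")) = [] := by
        rw [List.filter_eq_nil_iff]
        intro c hc
        rw [hall c hc]
        decide
      simp [hfil, hcnt, List.replicate_succ]
      exact hrep
    · have hx' : (x == "9") = false := by simpa using hx
      rw [List.dropWhile_cons] at h
      simp only [hx', Bool.not_false, if_true] at h
      rw [List.filter_cons, List.countP_cons]
      simp only [hx', Bool.not_false, if_true, if_false, Bool.false_eq_true, Nat.add_zero]
      rw [List.cons_append]
      exact congrArg (x :: ·) (iht h)

-- pushing k more '9's behind such a list absorbs its own trailing '9' block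
theorem tail_shift (t : List String)
    (h : ((t.dropWhile (fun c => !(c == "9"))).any (fun c => !(c == "9"))) = false)
    (k : Nat) :
    t ++ List.replicate k "9" =
      t.filter (fun c => !(c == "9")) ++
        List.replicate (k + t.countP (fun c => c == "9")) "9" := by
  conv_lhs => rw [no_interior_nine t h]
  rw [List.append_assoc, ← List.replicate_add, Nat.add_comm]

-- a "non-'9's then '9's" list has no '9' strictly before a non-'9'
theorem nine_block_any (c : Nat) (F : List String) (hF : ∀ f ∈ F, (f == "9") = false) :
    ((F ++ List.replicate c "9").dropWhile (fun x => !(x == "9"))).any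
      (fun x => !(x == "9")) = false := by
  induction F with
  | nil =>
    cases c with
    | zero => simp
    | succ n =>
      simp only [List.nil_append, List.replicate_succ, List.dropWhile_cons]
      simp
  | cons f F ihF =>
    have hf : (f == "9") = false := hF f (by simp)
    simp only [List.cons_append, List.dropWhile_cons, hf, Bool.not_false, if_true]
    exact ihF (fun g hg => hF g (by simp [hg]))

-- the per-row agreement: A's bounded scan equals B's stable sort whenever the part of the
-- row beyond the scan bound has no '9' before a non-'9'
theorem row_eq (row : List String) (m : Nat) (hm : m ≤ row.length)
    (h : (((row.drop m).dropWhile (fun c => !(c == "9"))).any (fun c => !(c == "9"))) = false) :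
    (pullScan row 0 m).1 ++ List.replicate (pullScan row 0 m).2 "9" =
      PySem.List.sorted row (fun c => c == "9") := by
  rw [pullScan_eq m row 0 hm, sorted_key9]
  conv_rhs => rw [← List.take_append_drop m row, List.filter_append, List.countP_append]
  rw [List.append_assoc, tail_shift (row.drop m) h, Nat.zero_add, List.append_assoc]

-- ===== VERDICT (by name: the statement is the Claim_ definition above) =====
theorem pull_spec : Claim_unchanged_pull := by
  intro board _ hPre hnD
  show pull board = pull_alt board
  unfold pull pull_alt
  apply List.map_congr_left
  intro row hrow
  have hm : (board.headD []).length ≤ row.length := hPre row hrow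
  have hrowD : (((row.drop (board.headD []).length).dropWhile (fun c => !(c == "9"))).any
      (fun c => !(c == "9"))) = false := by
    cases hb : (((row.drop (board.headD []).length).dropWhile (fun c => !(c == "9"))).any
        (fun c => !(c == "9"))) with
    | false => rfl
    | true => exact absurd ⟨row, hrow, hb⟩ hnD
  simpa using row_eq row _ hm hrowD

theorem pull_changed : Claim_changed_pull := by unfold Claim_changed_pull; decide

theorem pull_tight : Claim_exact_pull := by
  intro board _ hPre hD heq
  obtain ⟨row, hrow, hAny⟩ := hD
  unfold pull pull_alt at heq
  have hre := List.map_inj_left.mp heq row hrow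
  have hm : (board.headD []).length ≤ row.length := hPre row hrow
  simp only [] at hre
  rw [pullScan_eq _ row 0 hm, sorted_key9] at hre
  conv_rhs at hre =>
    rw [← List.take_append_drop (board.headD []).length row, List.filter_append,
      List.countP_append]
  simp only [Nat.zero_add, List.append_assoc] at hre
  have h2 := List.append_cancel_left hre
  rw [Nat.add_comm, List.replicate_add, ← List.append_assoc] at h2
  have h3 := List.append_cancel_right h2
  rw [h3] at hAny
  have := nine_block_any ((row.drop (board.headD []).length).countP (fun c => c == "9"))
    ((row.drop (board.headD []).length).filter (fun c => !(c == "9")))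
    (fun f hf => by
      have := List.of_mem_filter hf
      simpa using this)
  rw [hAny] at this
  exact Bool.true_eq_false.mp this
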